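-- pv_equiv track=rewrite | github.com/mtiganik/R8-hometask-mihkel-tiganik | services/command_view_service.py | stringInComment
-- ===== SOURCE A (Python) =====
-- def stringInComment(str):
--     res = str
--     strLen = len(str)
--     for i in range(1,8):
--         if strLen < i*8:
--             return res + '\t'*(8-i)
--     if strLen > 55:
--         return res[:52] + "...\t"
--     return res[:55]
-- ===== SOURCE B (Python) =====
-- def stringInComment(str):
--     n = len(str)
--     if n <= 55:
--         return str + '\t' * (7 - n // 8)
--     return str[:52] + "...\t"
-- ===== Notes on version B (the rewrite author's own statement) =====
-- stated objective: simpler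
-- what changed: Replaced the range(1,8) tab-stop scan with a closed-form tab count 7 - len//8 and dropped the unreachable final return.
import Mathlib
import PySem

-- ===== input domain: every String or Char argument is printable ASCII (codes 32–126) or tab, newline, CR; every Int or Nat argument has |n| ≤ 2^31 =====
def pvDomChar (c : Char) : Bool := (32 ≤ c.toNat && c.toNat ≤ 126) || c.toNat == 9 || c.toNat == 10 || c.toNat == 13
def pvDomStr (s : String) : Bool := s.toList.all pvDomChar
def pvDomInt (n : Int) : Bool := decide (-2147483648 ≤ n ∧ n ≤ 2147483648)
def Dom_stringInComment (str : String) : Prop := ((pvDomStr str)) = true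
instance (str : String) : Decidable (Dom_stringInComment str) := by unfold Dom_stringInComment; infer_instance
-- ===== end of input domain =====

-- B replaces A's range(1,8) tab-stop scan by a closed-form tab count 7 - len//8 (objective: simpler); return values agree everywhere.

-- ===== PORT A =====
-- the for-loop with early return: first i in the list with strLen < i*8 yields the result
def stringInCommentLoop (res : String) (strLen : Int) : List Int → Option String
  | [] => none
  | i :: rest =>
    if strLen < i * 8 then some (res ++ String.mk (PySem.List.pyRepeat ['\t'] (8 - i)))
    else stringInCommentLoop res strLen rest

def stringInComment (str : String) : String :=
  let res := str
  let strLen : Int := PySem.Str.len str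
  match stringInCommentLoop res strLen (PySem.List.pyRange 1 8 1) with
  | some r => r
  | none =>
    if strLen > 55 then PySem.Str.slice res none (some 52) ++ "...\t"
    else PySem.Str.slice res none (some 55)

-- ===== PORT B =====
def stringInComment_alt (str : String) : String :=
  let n : Int := PySem.Str.len str
  if n ≤ 55 then str ++ String.mk (PySem.List.pyRepeat ['\t'] (7 - PySem.Int.floordiv n 8))
  else PySem.Str.slice str none (some 52) ++ "...\t"

-- ===== PRECONDITION & SPEC =====
def Spec_stringInComment (str : String) (out : String) : Prop := out = stringInComment_alt str
instance (str : String) (out : String) : Decidable (Spec_stringInComment str out) := by unfold Spec_stringInComment; infer_instance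

-- ===== CLAIM (what is proved, stated in full; the proofs are below) =====
def Claim_equal_stringInComment : Prop := ∀ (str : String), Dom_stringInComment str → Spec_stringInComment str (stringInComment str)

-- ===== LEMMAS AND PROOFS =====
theorem pyRange_1_8 : PySem.List.pyRange 1 8 1 = [1, 2, 3, 4, 5, 6, 7] := by
  have h : ((8 : Int) - 1).toNat = 7 := rfl
  rw [PySem.List.pyRange_one, h]
  simp [List.range_succ]

-- ===== VERDICT (by name: the statement is the Claim_ definition above) =====
theorem stringInComment_spec : Claim_equal_stringInComment := by
  intro str _
  unfold Spec_stringInComment stringInComment stringInComment_alt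
  rw [pyRange_1_8]
  simp only [stringInCommentLoop, PySem.Str.len]
  have hfd : PySem.Int.floordiv ((str.toList.length : Int)) 8 = (str.toList.length : Int) / 8 :=
    PySem.Int.floordiv_eq_ediv_of_pos (by omega)
  rw [hfd]
  by_cases c1 : (str.toList.length : Int) < 1 * 8
  · -- bucket 1: 0 ≤ len < 8
    rw [if_pos (by omega : (str.toList.length : Int) < 1 * 8)]
    rw [if_pos (by omega : (str.toList.length : Int) ≤ 55)]
    show str ++ String.mk (PySem.List.pyRepeat ['\t'] (8 - 1)) = _
    have hx : 7 - (str.toList.length : Int) / 8 = 8 - 1 := by omega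
    rw [hx]
  by_cases c2 : (str.toList.length : Int) < 2 * 8
  · -- bucket 2: 8 ≤ len < 16
    rw [if_neg (by omega : ¬((str.toList.length : Int) < 1 * 8))]
    rw [if_pos (by omega : (str.toList.length : Int) < 2 * 8)]
    rw [if_pos (by omega : (str.toList.length : Int) ≤ 55)]
    show str ++ String.mk (PySem.List.pyRepeat ['\t'] (8 - 2)) = _
    have hx : 7 - (str.toList.length : Int) / 8 = 8 - 2 := by omega
    rw [hx]
  by_cases c3 : (str.toList.length : Int) < 3 * 8
  · -- bucket 3: 16 ≤ len < 24
    rw [if_neg (by omega : ¬((str.toList.length : Int) < 1 * 8))]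
    rw [if_neg (by omega : ¬((str.toList.length : Int) < 2 * 8))]
    rw [if_pos (by omega : (str.toList.length : Int) < 3 * 8)]
    rw [if_pos (by omega : (str.toList.length : Int) ≤ 55)]
    show str ++ String.mk (PySem.List.pyRepeat ['\t'] (8 - 3)) = _
    have hx : 7 - (str.toList.length : Int) / 8 = 8 - 3 := by omega
    rw [hx]
  by_cases c4 : (str.toList.length : Int) < 4 * 8
  · -- bucket 4: 24 ≤ len < 32
    rw [if_neg (by omega : ¬((str.toList.length : Int) < 1 * 8))]
    rw [if_neg (by omega : ¬((str.toList.length : Int) < 2 * 8))]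
    rw [if_neg (by omega : ¬((str.toList.length : Int) < 3 * 8))]
    rw [if_pos (by omega : (str.toList.length : Int) < 4 * 8)]
    rw [if_pos (by omega : (str.toList.length : Int) ≤ 55)]
    show str ++ String.mk (PySem.List.pyRepeat ['\t'] (8 - 4)) = _
    have hx : 7 - (str.toList.length : Int) / 8 = 8 - 4 := by omega
    rw [hx]
  by_cases c5 : (str.toList.length : Int) < 5 * 8
  · -- bucket 5: 32 ≤ len < 40
    rw [if_neg (by omega : ¬((str.toList.length : Int) < 1 * 8))]
    rw [if_neg (by omega : ¬((str.toList.length : Int) < 2 * 8))]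
    rw [if_neg (by omega : ¬((str.toList.length : Int) < 3 * 8))]
    rw [if_neg (by omega : ¬((str.toList.length : Int) < 4 * 8))]
    rw [if_pos (by omega : (str.toList.length : Int) < 5 * 8)]
    rw [if_pos (by omega : (str.toList.length : Int) ≤ 55)]
    show str ++ String.mk (PySem.List.pyRepeat ['\t'] (8 - 5)) = _
    have hx : 7 - (str.toList.length : Int) / 8 = 8 - 5 := by omega
    rw [hx]
  by_cases c6 : (str.toList.length : Int) < 6 * 8
  · -- bucket 6: 40 ≤ len < 48
    rw [if_neg (by omega : ¬((str.toList.length : Int) < 1 * 8))]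
    rw [if_neg (by omega : ¬((str.toList.length : Int) < 2 * 8))]
    rw [if_neg (by omega : ¬((str.toList.length : Int) < 3 * 8))]
    rw [if_neg (by omega : ¬((str.toList.length : Int) < 4 * 8))]
    rw [if_neg (by omega : ¬((str.toList.length : Int) < 5 * 8))]
    rw [if_pos (by omega : (str.toList.length : Int) < 6 * 8)]
    rw [if_pos (by omega : (str.toList.length : Int) ≤ 55)]
    show str ++ String.mk (PySem.List.pyRepeat ['\t'] (8 - 6)) = _
    have hx : 7 - (str.toList.length : Int) / 8 = 8 - 6 := by omega
    rw [hx]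
  by_cases c7 : (str.toList.length : Int) < 7 * 8
  · -- bucket 7: 48 ≤ len < 56
    rw [if_neg (by omega : ¬((str.toList.length : Int) < 1 * 8))]
    rw [if_neg (by omega : ¬((str.toList.length : Int) < 2 * 8))]
    rw [if_neg (by omega : ¬((str.toList.length : Int) < 3 * 8))]
    rw [if_neg (by omega : ¬((str.toList.length : Int) < 4 * 8))]
    rw [if_neg (by omega : ¬((str.toList.length : Int) < 5 * 8))]
    rw [if_neg (by omega : ¬((str.toList.length : Int) < 6 * 8))]
    rw [if_pos (by omega : (str.toList.length : Int) < 7 * 8)]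
    rw [if_pos (by omega : (str.toList.length : Int) ≤ 55)]
    show str ++ String.mk (PySem.List.pyRepeat ['\t'] (8 - 7)) = _
    have hx : 7 - (str.toList.length : Int) / 8 = 8 - 7 := by omega
    rw [hx]
  -- len ≥ 56: the loop falls through and the truncation branch fires
  rw [if_neg (by omega : ¬((str.toList.length : Int) < 1 * 8))]
  rw [if_neg (by omega : ¬((str.toList.length : Int) < 2 * 8))]
  rw [if_neg (by omega : ¬((str.toList.length : Int) < 3 * 8))]
  rw [if_neg (by omega : ¬((str.toList.length : Int) < 4 * 8))]
  rw [if_neg (by omega : ¬((str.toList.length : Int) < 5 * 8))]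
  rw [if_neg (by omega : ¬((str.toList.length : Int) < 6 * 8))]
  rw [if_neg (by omega : ¬((str.toList.length : Int) < 7 * 8))]
  rw [if_neg (by omega : ¬((str.toList.length : Int) ≤ 55))]
  show (if (str.toList.length : Int) > 55 then PySem.Str.slice str none (some 52) ++ "...\t" else PySem.Str.slice str none (some 55)) = _
  rw [if_pos (by omega : (str.toList.length : Int) > 55)]
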